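-- pv_equiv track=rewrite | github.com/miliar/Code_Jam_Webscraper | solutions_python/solutions_year17_round0_nr3/2336.py | select_best_stall
-- ===== SOURCE A (Python) =====
-- def select_best_stall(stalls):
--     """Deprecated"""
--     spaces = stalls.split('O')
--     max_l = max(map(lambda x: len(x), spaces))
--     index = 0
--     for i, s in enumerate(spaces):
--         if len(s) == max_l:
--             index = i
--             break
--     x = max_l // 2
--     if max_l % 2 == 0:
--         l, r = x - 1, x
--         i = x - 1
--     else:
--         l, r = x, x
--         i = x
--     spaces[index] = spaces[index][:i] + 'O' + spaces[index][i+1:]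
--     return 'O'.join(spaces), l, r
-- ===== SOURCE B (Python) =====
-- def select_best_stall(stalls):
--     # One left-to-right scan tracking the current run of non-'O' characters;
--     # records the start of the first strictly-longest run.
--     best = 0
--     start = 0
--     cur = 0
--     pos = 0
--     for c in stalls:
--         if c == 'O':
--             cur = 0
--         else:
--             cur += 1
--             if cur > best:
--                 best = cur
--                 start = pos - cur + 1
--         pos += 1
--     x = best // 2
--     if best % 2 == 0:
--         l, r = x - 1, x
--         i = x - 1
--     else:
--         l, r = x, x
--         i = x
--     seg = stalls[start:start + best]
--     seg2 = seg[:i] + 'O' + seg[i + 1:]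
--     return stalls[:start] + seg2 + stalls[start + best:], l, r
-- ===== Notes on version B (the rewrite author's own statement) =====
-- stated objective: alternative
-- what changed: Replaced A's split('O')/max/first-index/'O'.join pipeline with a single left-to-right scan that tracks the current run of non-'O' characters and its start, then patches the string by slicing around the found gap.
import Mathlib
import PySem

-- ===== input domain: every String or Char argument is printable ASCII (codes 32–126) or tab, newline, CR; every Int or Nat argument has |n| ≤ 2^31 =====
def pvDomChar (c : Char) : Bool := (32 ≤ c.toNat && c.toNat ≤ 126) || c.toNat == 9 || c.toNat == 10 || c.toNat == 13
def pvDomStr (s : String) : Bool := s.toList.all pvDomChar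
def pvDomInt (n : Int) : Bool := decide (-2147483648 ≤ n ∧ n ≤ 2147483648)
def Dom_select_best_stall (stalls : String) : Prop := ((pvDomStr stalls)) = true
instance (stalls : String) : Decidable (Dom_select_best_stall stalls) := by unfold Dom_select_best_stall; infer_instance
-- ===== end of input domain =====

-- B replaces A's split('O')/max/'O'.join pipeline by a single left-to-right scan that
-- tracks the current run of non-'O' characters and patches the string by slicing (objective: alternative).

-- ===== PORT A =====
-- the 'for i, s in enumerate(spaces): if len(s) == max_l: index = i; break' loop (index stays 0 if no match)
def selIdx : List (List Char) → Int → Int → Int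
  | [], _, _ => 0
  | s :: t, m, j => if PySem.List.len s = m then j else selIdx t m (j + 1)

def select_best_stall (stalls : String) : String × Int × Int :=
  let spaces := PySem.Chars.splitOn stalls.toList ['O']
  -- split('O') never returns an empty list, so Python's max never raises; .getD 0 is unreachable
  let maxL := (PySem.List.max? (spaces.map (fun s => PySem.List.len s)) id).getD 0
  let index := selIdx spaces maxL 0
  let x := PySem.Int.floordiv maxL 2
  let lri := if PySem.Int.mod maxL 2 = 0 then (x - 1, x, x - 1) else (x, x, x)
  let i := lri.2.2
  -- spaces[index] is always in range (index is 0 or a found position), so pyGetD/pySetD defaults are unreachable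
  let piece := PySem.List.pyGetD spaces index []
  let newp := PySem.List.slice piece none (some i) ++ ['O'] ++ PySem.List.slice piece (some (i + 1)) none
  let spaces' := PySem.List.pySetD spaces index newp
  (String.ofList (PySem.Chars.join ['O'] spaces'), lri.1, lri.2.1)

-- ===== PORT B =====
-- one scan step: state (best, start, cur, pos)
def scanStep (st : Int × Int × Int × Int) (c : Char) : Int × Int × Int × Int :=
  if c = 'O' then (st.1, st.2.1, 0, st.2.2.2 + 1)
  else
    let cur := st.2.2.1 + 1
    if st.1 < cur then (cur, st.2.2.2 - cur + 1, cur, st.2.2.2 + 1)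
    else (st.1, st.2.1, cur, st.2.2.2 + 1)

def select_best_stall_alt (stalls : String) : String × Int × Int :=
  let st := stalls.toList.foldl scanStep (0, 0, 0, 0)
  let best := st.1
  let start := st.2.1
  let x := PySem.Int.floordiv best 2
  let lri := if PySem.Int.mod best 2 = 0 then (x - 1, x, x - 1) else (x, x, x)
  let i := lri.2.2
  let seg := PySem.List.slice stalls.toList (some start) (some (start + best))
  let seg2 := PySem.List.slice seg none (some i) ++ ['O'] ++ PySem.List.slice seg (some (i + 1)) none
  (String.ofList (PySem.List.slice stalls.toList none (some start) ++ seg2 ++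
      PySem.List.slice stalls.toList (some (start + best)) none), lri.1, lri.2.1)

-- ===== PRECONDITION & SPEC =====
def Spec_select_best_stall (stalls : String) (out : String × Int × Int) : Prop := out = select_best_stall_alt stalls
instance (stalls : String) (out : String × Int × Int) : Decidable (Spec_select_best_stall stalls out) := by unfold Spec_select_best_stall; infer_instance

-- ===== CLAIM (what is proved, stated in full; the proofs are below) =====
def Claim_equal_select_best_stall : Prop := ∀ (stalls : String), Dom_select_best_stall stalls → Spec_select_best_stall stalls (select_best_stall stalls)

-- ===== LEMMAS AND PROOFS =====

-- the pieces of cs between the 'O's (what split('O') returns), as a structural recursion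
def pieces : List Char → List (List Char)
  | [] => [[]]
  | c :: t => if c = 'O' then [] :: pieces t else (c :: (pieces t).headI) :: (pieces t).tail

-- maximal piece length
def fmx : List (List Char) → Nat
  | [] => 0
  | p :: t => max p.length (fmx t)

-- start offset (in the joined string) of the first piece of maximal length
def fms : List (List Char) → Nat
  | [] => 0
  | p :: t => if fmx t ≤ p.length then 0 else p.length + 1 + fms t

-- B's fold over the joined string, piece by piece (only best and start are kept)
def bsF : Int → Int → Int → List (List Char) → Int × Int
  | b, s, _, [] => (b, s)
  | b, s, pos, p :: t =>
      bsF (max b p.length) (if b < (p.length : Int) then pos else s) (pos + p.length + 1) t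

theorem pieces_ne_nil (cs : List Char) : pieces cs ≠ [] := by
  cases cs with
  | nil => simp [pieces]
  | cons c t => simp only [pieces]; split <;> simp

theorem pieces_head_tail (cs : List Char) : pieces cs = (pieces cs).headI :: (pieces cs).tail := by
  cases h : pieces cs with
  | nil => exact absurd h (pieces_ne_nil cs)
  | cons a t => simp

theorem pieces_free (cs : List Char) : ∀ p ∈ pieces cs, 'O' ∉ p := by
  induction cs with
  | nil => simp [pieces]
  | cons c t ih =>
    simp only [pieces]
    split
    · intro p hp
      rcases List.mem_cons.mp hp with h | h
      · simp [h]
      · exact ih p h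
    · rename_i hc
      intro p hp
      rcases List.mem_cons.mp hp with h | h
      · subst h
        intro hm
        rcases List.mem_cons.mp hm with h | h
        · exact hc h.symm
        · exact ih _ (by rw [pieces_head_tail t]; exact List.mem_cons_self) h
      · exact ih p (by rw [pieces_head_tail t]; exact List.mem_cons_of_mem _ h)

theorem intercalate_cons (s a : List Char) (l : List (List Char)) (h : l ≠ []) :
    List.intercalate s (a :: l) = a ++ s ++ List.intercalate s l := by
  cases l with
  | nil => simp at h
  | cons b t => simp [List.intercalate, List.intersperse]

theorem pieces_join (cs : List Char) : List.intercalate ['O'] (pieces cs) = cs := by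
  induction cs with
  | nil => simp [pieces, List.intercalate]
  | cons c t ih =>
    simp only [pieces]
    split
    · rename_i hc
      rw [intercalate_cons _ _ _ (pieces_ne_nil t), ih]
      simp [hc]
    · rw [pieces_head_tail t] at ih ⊢
      cases ht : (pieces t).tail with
      | nil =>
        rw [ht] at ih
        simp [List.intercalate] at ih ⊢
        exact ih
      | cons b t' =>
        rw [ht] at ih
        rw [intercalate_cons _ _ _ (by simp)] at ih ⊢
        simpa using ih

theorem splitOn_go_eq (fuel : Nat) : ∀ (l cur : List Char) (acc : List (List Char)),
    l.length ≤ fuel →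
    PySem.Chars.splitOn.go ['O'] fuel l cur acc =
      acc.reverse ++ (cur.reverse ++ (pieces l).headI) :: (pieces l).tail := by
  induction fuel with
  | zero =>
    intro l cur acc h
    have : l = [] := by cases l <;> simp_all
    subst this
    simp [PySem.Chars.splitOn.go, pieces]
  | succ f ih =>
    intro l cur acc h
    cases l with
    | nil => simp [PySem.Chars.splitOn.go, pieces]
    | cons c rest =>
      rw [PySem.Chars.splitOn.go]
      by_cases hc : c = 'O'
      · have hpre : List.isPrefixOf ['O'] (c :: rest) = true := by
          simp [List.isPrefixOf, hc]
        rw [if_pos hpre]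
        simp only [List.length_cons] at h
        rw [ih _ _ _ (by simpa using Nat.le_of_succ_le_succ h)]
        simp [pieces, hc]
        exact (pieces_head_tail rest).symm
      · have hpre : List.isPrefixOf ['O'] (c :: rest) = false := by
          simp [List.isPrefixOf]; intro h'; exact absurd h'.symm hc
        rw [if_neg (by simp [hpre])]
        simp only [List.length_cons] at h
        rw [ih _ _ _ (Nat.le_of_succ_le_succ h)]
        simp only [pieces, if_neg hc]
        simp

theorem splitOn_eq_pieces (cs : List Char) : PySem.Chars.splitOn cs ['O'] = pieces cs := by
  rw [PySem.Chars.splitOn, splitOn_go_eq _ _ _ _ (by omega)]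
  simpa using (pieces_head_tail cs).symm

theorem max?_single (x : Int) : PySem.List.max? [x] id = some x := by
  rw [PySem.List.max?]; rfl

theorem max?_cons_cons (x y : Int) (xs : List Int) :
    PySem.List.max? (x :: y :: xs) id = PySem.List.max? (max x y :: xs) id := by
  rw [PySem.List.max?, PySem.List.max?]
  simp only [List.foldl_cons]
  congr 2
  rw [max_def]
  split_ifs <;> simp_all <;> omega

theorem max?_int (xs : List Int) : ∀ x, PySem.List.max? (x :: xs) id = some (xs.foldl max x) := by
  induction xs with
  | nil => intro x; simpa using max?_single x
  | cons y t ih => intro x; rw [max?_cons_cons, ih]; simp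

theorem foldl_max_len (t : List (List Char)) : ∀ a : Int, 0 ≤ a →
    (t.map (fun s => PySem.List.len s)).foldl max a = max a (fmx t) := by
  induction t with
  | nil => intro a ha; simp [fmx]; omega
  | cons p t ih =>
    intro a ha
    simp only [List.map_cons, List.foldl_cons]
    rw [ih _ (by positivity)]
    simp only [PySem.List.len, fmx]
    push_cast
    omega

theorem maxL_eq (P : List (List Char)) (h : P ≠ []) :
    (PySem.List.max? (P.map (fun s => PySem.List.len s)) id).getD 0 = (fmx P : Int) := by
  cases P with
  | nil => simp at h
  | cons p t =>
    rw [List.map_cons, max?_int, Option.getD_some,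
      foldl_max_len t _ (by simp [PySem.List.len])]
    simp only [PySem.List.len, fmx]
    push_cast
    omega

theorem fmx_attained (P : List (List Char)) (h : P ≠ []) : ∃ p ∈ P, p.length = fmx P := by
  induction P with
  | nil => simp at h
  | cons p t ih =>
    by_cases ht : t = []
    · subst ht; exact ⟨p, by simp, by simp [fmx]⟩
    · rcases ih ht with ⟨q, hq, hlen⟩
      by_cases hc : fmx t ≤ p.length
      · exact ⟨p, by simp, by simp [fmx]; omega⟩
      · exact ⟨q, by simp [hq], by simp [fmx]; omega⟩

theorem selIdx_shift (t : List (List Char)) : ∀ (m j : Int),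
    (∃ s ∈ t, PySem.List.len s = m) → selIdx t m j = j + selIdx t m 0 := by
  induction t with
  | nil => simp
  | cons s t ih =>
    intro m j hex
    by_cases hs : PySem.List.len s = m
    · simp only [selIdx, if_pos hs]; ring
    · have hex' : ∃ q ∈ t, PySem.List.len q = m := by
        rcases hex with ⟨q, hq, hlen⟩
        rcases List.mem_cons.mp hq with h | h
        · exact absurd (h ▸ hlen) hs
        · exact ⟨q, h, hlen⟩
      simp only [selIdx, if_neg hs]
      rw [ih m (j + 1) hex', ih m (0 + 1) hex']
      ring

-- A-side decomposition: the found index, the piece there, and the join-split of the string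
theorem A_decomp (P : List (List Char)) : P ≠ [] →
    ∃ (k : Nat) (pre suf : List Char),
      k < P.length ∧
      selIdx P (fmx P : Int) 0 = (k : Int) ∧
      (P.getD k []).length = fmx P ∧
      pre.length = fms P ∧
      List.intercalate ['O'] P = pre ++ P.getD k [] ++ suf ∧
      ∀ q, List.intercalate ['O'] (P.set k q) = pre ++ q ++ suf := by
  induction P with
  | nil => intro h; simp at h
  | cons p t ih =>
    intro _
    by_cases hc : fmx t ≤ p.length
    · -- p is the first piece of maximal length: k = 0
      have hM : fmx (p :: t) = p.length := by simp [fmx]; omega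
      refine ⟨0, [], (if t = [] then [] else 'O' :: List.intercalate ['O'] t), by simp, ?_, ?_, ?_, ?_, ?_⟩
      · simp [selIdx, PySem.List.len, hM]
      · simpa using hM.symm
      · simp [fms, hc]
      · by_cases ht : t = []
        · simp [ht, List.intercalate]
        · rw [intercalate_cons _ _ _ ht]; simp [ht]
      · intro q
        by_cases ht : t = []
        · simp [ht, List.intercalate]
        · rw [List.set_cons_zero, intercalate_cons _ _ _ ht]; simp [ht]
    · -- the first maximal piece lies in t: k = k' + 1
      rw [not_le] at hc
      have ht : t ≠ [] := by
        intro h; rw [h] at hc; simp [fmx] at hc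
      have hM : fmx (p :: t) = fmx t := by simp [fmx]; omega
      rcases ih ht with ⟨k', pre', suf', hk', hsel', hlen', hpre', hsplit', hset'⟩
      refine ⟨k' + 1, p ++ ['O'] ++ pre', suf', by simpa using hk', ?_, ?_, ?_, ?_, ?_⟩
      · have hne : PySem.List.len p ≠ (fmx (p :: t) : Int) := by
          simp [PySem.List.len, hM]; omega
        have hexists : ∃ s ∈ t, PySem.List.len s = (fmx (p :: t) : Int) := by
          rcases fmx_attained t ht with ⟨q, hq, hqlen⟩
          exact ⟨q, hq, by simp [PySem.List.len, hqlen, hM]⟩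
        simp only [selIdx, if_neg hne]
        rw [selIdx_shift t _ _ hexists, hM, hsel']
        push_cast; ring
      · simpa [hM] using hlen'
      · simp only [fms]; rw [if_neg (by omega)]; simp [hpre']; omega
      · rw [intercalate_cons _ _ _ ht, hsplit']; simp
      · intro q
        have hts : t.set k' q ≠ [] := by
          cases t with
          | nil => exact absurd rfl ht
          | cons a b => cases k' <;> simp
        rw [List.set_cons_succ, intercalate_cons _ _ _ hts, hset']
        simp

theorem scan_free (p : List Char) : 'O' ∉ p →
    ∀ (b s k pos : Int), 0 ≤ k → k ≤ b →
    p.foldl scanStep (b, s, k, pos) =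
      (max b (k + p.length), if b < k + p.length then pos - k else s,
       k + p.length, pos + p.length) := by
  induction p with
  | nil =>
    intro _ b s k pos hk hkb
    simp only [List.foldl_nil, List.length_nil, Nat.cast_zero, Prod.mk.injEq]
    refine ⟨by omega, ?_, by omega, by omega⟩
    split_ifs <;> omega
  | cons c p ih =>
    intro hfree b s k pos hk hkb
    have hc : c ≠ 'O' := fun h => hfree (h ▸ List.mem_cons_self)
    have hfree' : 'O' ∉ p := fun h => hfree (List.mem_cons_of_mem _ h)
    simp only [List.foldl_cons]
    rw [show scanStep (b, s, k, pos) c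
        = if b < k + 1 then (k + 1, pos - (k + 1) + 1, k + 1, pos + 1)
          else (b, s, k + 1, pos + 1) from by simp [scanStep, hc]]
    by_cases hlt : b < k + 1
    · rw [if_pos hlt, ih hfree' _ _ _ _ (by omega) (by omega)]
      simp only [Prod.mk.injEq, List.length_cons]
      push_cast
      refine ⟨by omega, ?_, by omega, by omega⟩
      split_ifs <;> omega
    · rw [if_neg hlt, ih hfree' _ _ _ _ (by omega) (by omega)]
      simp only [Prod.mk.injEq, List.length_cons]
      push_cast
      refine ⟨by omega, ?_, by omega, by omega⟩
      split_ifs <;> omega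

theorem scan_pieces (P : List (List Char)) : (∀ p ∈ P, 'O' ∉ p) →
    ∀ (b s pos : Int), 0 ≤ b →
    ((List.intercalate ['O'] P).foldl scanStep (b, s, 0, pos)).1 = (bsF b s pos P).1 ∧
    ((List.intercalate ['O'] P).foldl scanStep (b, s, 0, pos)).2.1 = (bsF b s pos P).2 := by
  induction P with
  | nil => intro _ b s pos hb; simp [List.intercalate, bsF]
  | cons p t ih =>
    intro hfree b s pos hb
    have hfp : 'O' ∉ p := hfree p List.mem_cons_self
    by_cases ht : t = []
    · subst ht
      rw [show List.intercalate ['O'] [p] = p from by simp [List.intercalate]]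
      rw [scan_free p hfp b s 0 pos le_rfl hb]
      simp only [zero_add, sub_zero, bsF]
      exact ⟨trivial, trivial⟩
    · rw [intercalate_cons _ _ _ ht, List.append_assoc, List.foldl_append,
        scan_free p hfp b s 0 pos le_rfl hb]
      simp only [zero_add, sub_zero, List.singleton_append, List.foldl_cons]
      rw [show scanStep (max b ↑p.length, if b < (p.length : Int) then pos else s,
            (p.length : Int), pos + ↑p.length) 'O'
          = (max b ↑p.length, if b < (p.length : Int) then pos else s, 0,
            pos + ↑p.length + 1) from by simp [scanStep]]
      have hIH := ih (fun q hq => hfree q (List.mem_cons_of_mem _ hq))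
        (max b ↑p.length) (if b < (p.length : Int) then pos else s)
        (pos + ↑p.length + 1) (by omega)
      simp only [bsF]
      exact hIH

theorem bsF_spec (P : List (List Char)) : ∀ (b s pos : Int), 0 ≤ b →
    bsF b s pos P = (max b (fmx P : Int), if b < (fmx P : Int) then pos + fms P else s) := by
  induction P with
  | nil =>
    intro b s pos hb
    simp only [bsF, fmx, fms, Nat.cast_zero, Prod.mk.injEq]
    refine ⟨by omega, ?_⟩
    split_ifs <;> omega
  | cons p t ih =>
    intro b s pos hb
    simp only [bsF]
    rw [ih _ _ _ (by omega)]
    simp only [fmx, fms, Prod.mk.injEq]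
    push_cast
    refine ⟨by omega, ?_⟩
    split_ifs <;> omega

theorem fms_zero (P : List (List Char)) (h : fmx P = 0) : fms P = 0 := by
  cases P with
  | nil => simp [fms]
  | cons p t =>
    simp only [fmx] at h
    simp [fms]
    omega

-- ===== VERDICT (by name: the statement is the Claim_ definition above) =====
theorem select_best_stall_spec : Claim_equal_select_best_stall := by
  intro stalls _
  unfold Spec_select_best_stall
  simp only [select_best_stall, select_best_stall_alt]
  obtain ⟨k, pre, suf, hk, hsel, hlen, hpre, hsplit, hset⟩ :=
    A_decomp (pieces stalls.toList) (pieces_ne_nil stalls.toList)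
  have hcs3 : stalls.toList = pre ++ ((pieces stalls.toList).getD k [] ++ suf) := by
    rw [← List.append_assoc, ← hsplit, pieces_join]
  -- A side
  rw [splitOn_eq_pieces, maxL_eq _ (pieces_ne_nil stalls.toList), hsel,
    PySem.List.pyGetD_natCast, PySem.List.pySetD_natCast]
  simp only [PySem.Chars.join]
  rw [hset]
  -- B side: the scan computes (fmx, fms)
  have hscan := scan_pieces (pieces stalls.toList) (pieces_free stalls.toList) 0 0 0 le_rfl
  rw [bsF_spec _ 0 0 0 le_rfl, pieces_join] at hscan
  have hbest : (List.foldl scanStep (0, 0, 0, 0) stalls.toList).1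
      = ((fmx (pieces stalls.toList) : Nat) : Int) := by
    rw [hscan.1]; omega
  have hstart : (List.foldl scanStep (0, 0, 0, 0) stalls.toList).2.1
      = ((fms (pieces stalls.toList) : Nat) : Int) := by
    rw [hscan.2]
    by_cases h0 : fmx (pieces stalls.toList) = 0
    · rw [if_neg (by simp [h0]), fms_zero _ h0]; simp
    · rw [if_pos (by omega)]; omega
  rw [hbest, hstart]
  -- the extracted segment is exactly the replaced piece
  have key : ∀ (cs pre x suf : List Char), cs = pre ++ (x ++ suf) →
      List.take x.length (List.drop pre.length cs) = x := by
    intro cs pre x suf h; subst h; rw [List.drop_left, List.take_left]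
  have key2 : ∀ (cs pre rest : List Char), cs = pre ++ rest →
      List.take pre.length cs = pre := by
    intro cs pre rest h; subst h; exact List.take_left
  have key3 : ∀ (cs a suf : List Char), cs = a ++ suf →
      List.drop a.length cs = suf := by
    intro cs a suf h; subst h; exact List.drop_left
  have hseg : PySem.List.slice stalls.toList
        (some ((fms (pieces stalls.toList) : Nat) : Int))
        (some (((fms (pieces stalls.toList) : Nat) : Int) + ((fmx (pieces stalls.toList) : Nat) : Int)))
      = (pieces stalls.toList).getD k [] := by
    rw [PySem.List.slice_natCast_add, ← hpre, ← hlen]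
    exact key _ pre _ suf hcs3
  have htake : PySem.List.slice stalls.toList none
        (some ((fms (pieces stalls.toList) : Nat) : Int)) = pre := by
    rw [PySem.List.slice_to_natCast, ← hpre]
    exact key2 _ pre _ hcs3
  have hdrop : PySem.List.slice stalls.toList
        (some (((fms (pieces stalls.toList) : Nat) : Int) + ((fmx (pieces stalls.toList) : Nat) : Int)))
        none = suf := by
    rw [← Nat.cast_add, PySem.List.slice_from_natCast]
    rw [show fms (pieces stalls.toList) + fmx (pieces stalls.toList)
        = (pre ++ (pieces stalls.toList).getD k []).length from by rw [List.length_append, hpre, hlen]]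
    exact key3 _ _ suf (by rw [List.append_assoc]; exact hcs3)
  rw [hseg, htake, hdrop]
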